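-- pv_equiv track=rewrite | github.com/mpa18pro/files_3 | file_3.py | sort_lines
-- ===== SOURCE A (Python) =====
-- def sort_lines(f_lines):
--     sorted_values = sorted(f_lines.values()) #Сортировка списка значений
--     f_sorted = {}
--     for i in sorted_values:
--         for k in f_lines.keys():
--             if f_lines[k] == i:
--                 f_sorted[k] = f_lines[k]
--                 break
--     return f_sorted
-- ===== SOURCE B (Python) =====
-- def sort_lines(f_lines):
--     first = {}
--     for k, v in f_lines.items():
--         if v not in first:
--             first[v] = k
--     return {first[v]: v for v in sorted(first)}
-- ===== Notes on version B (the rewrite author's own statement) =====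
-- stated objective: alternative
-- what changed: replaces the nested scan (for every sorted value, a linear search over all keys) by one pass building a value-to-first-key map plus a sort of the distinct values; intended as faster (O(n*m) to O(n log n)) but not consistently confirmed
import Mathlib
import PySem

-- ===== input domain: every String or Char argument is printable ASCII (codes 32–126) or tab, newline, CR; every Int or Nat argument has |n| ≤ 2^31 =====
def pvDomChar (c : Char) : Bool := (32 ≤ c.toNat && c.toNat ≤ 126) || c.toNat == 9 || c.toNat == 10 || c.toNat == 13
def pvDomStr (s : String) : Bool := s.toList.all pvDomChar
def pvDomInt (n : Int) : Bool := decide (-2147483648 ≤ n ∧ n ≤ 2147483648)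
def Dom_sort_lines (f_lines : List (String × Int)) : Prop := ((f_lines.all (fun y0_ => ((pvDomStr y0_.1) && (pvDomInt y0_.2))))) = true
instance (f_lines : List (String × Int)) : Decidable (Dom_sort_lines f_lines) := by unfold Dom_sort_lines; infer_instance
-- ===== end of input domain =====

-- B replaces A's nested scan by one pass building a value→first-key map plus a sort of the distinct values.
-- The dict argument is modelled as an association list; both ports first normalise it with PySem.Dict.ofList.

-- ===== PORT A =====
-- inner 'for k in f_lines.keys(): if f_lines[k] == i: f_sorted[k] = f_lines[k]; break'
def sortLinesInner (d : PySem.Dict String Int) (i : Int) :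
    List String → PySem.Dict String Int → PySem.Dict String Int
  | [], acc => acc
  | k :: ks, acc =>
      if d.getD k 0 == i then acc.insert k (d.getD k 0)
      else sortLinesInner d i ks acc

def sort_lines (f_lines : List (String × Int)) : List (String × Int) :=
  let d := PySem.Dict.ofList f_lines
  let sorted_values := PySem.List.sorted d.values (fun v => v) false
  (sorted_values.foldl (fun acc i => sortLinesInner d i d.keys acc) PySem.Dict.empty).items

-- ===== PORT B =====
def sort_lines_alt (f_lines : List (String × Int)) : List (String × Int) :=
  let d := PySem.Dict.ofList f_lines
  let first := d.items.foldl
      (fun f p => if f.contains p.2 then f else f.insert p.2 p.1)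
      (PySem.Dict.empty : PySem.Dict Int String)
  ((PySem.List.sorted first.keys (fun v => v) false).foldl
      (fun acc v => acc.insert (first.getD v "") v) PySem.Dict.empty).items

-- ===== PRECONDITION & SPEC =====
def Spec_sort_lines (f_lines : List (String × Int)) (out : List (String × Int)) : Prop := out = sort_lines_alt f_lines
instance (f_lines : List (String × Int)) (out : List (String × Int)) : Decidable (Spec_sort_lines f_lines out) := by unfold Spec_sort_lines; infer_instance

-- ===== CLAIM (what is proved, stated in full; the proofs are below) =====
def Claim_equal_sort_lines : Prop := ∀ (f_lines : List (String × Int)), Dom_sort_lines f_lines → Spec_sort_lines f_lines (sort_lines f_lines)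

-- ===== LEMMAS AND PROOFS =====

-- first key of d whose value is i (as A's inner loop finds it)
def fkey (its : List (String × Int)) (i : Int) : String :=
  ((its.find? (fun p => p.2 == i)).map Prod.fst).getD ""

-- appended after the claim block

-- A's inner loop over keys, expressed as find? over the items (given faithful lookups)
theorem inner_eq (d : PySem.Dict String Int) (i : Int) :
    ∀ (L : List (String × Int)) (acc : PySem.Dict String Int),
      (∀ p ∈ L, d.getD p.1 0 = p.2) →
      sortLinesInner d i (L.map Prod.fst) acc =
        (match L.find? (fun p => p.2 == i) with
         | some p => acc.insert p.1 p.2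
         | none => acc) := by
  intro L
  induction L with
  | nil => intro acc _; simp [sortLinesInner]
  | cons p L ih =>
      intro acc h
      obtain ⟨k, v⟩ := p
      have hk : d.getD k 0 = v := h (k, v) (by simp)
      by_cases hv : v = i
      · simp [sortLinesInner, hk, hv, List.find?]
      · have hne : ¬ (d.getD k 0 == i) = true := by simp [hk, hv]
        simp only [List.map_cons, sortLinesInner]
        rw [if_neg hne, List.find?_cons_of_neg (by simp [hv])]
        exact ih acc (fun q hq => h q (by simp [hq]))

-- generic fold-insert lemma: inserting (g v, v) for v in vs, with g injective on the touched values
theorem fold_insert_items (g : Int → String) :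
    ∀ (vs seen : List Int) (acc : PySem.Dict String Int),
      acc.items = seen.map (fun v => (g v, v)) →
      (∀ v ∈ seen ++ vs, ∀ w ∈ seen ++ vs, g v = g w → v = w) →
      (vs.foldl (fun a v => a.insert (g v) v) acc).items
        = (PySem.Set.update seen vs).map (fun v => (g v, v)) := by
  intro vs
  induction vs with
  | nil => intro seen acc h _; simpa [PySem.Set.update] using h
  | cons v vs ih =>
      intro seen acc h hinj
      simp only [List.foldl_cons, PySem.Set.update] at *
      by_cases hvs : v ∈ seen
      · have hc : acc.contains (g v) = true := by
          simp [PySem.Dict.contains, h]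
          exact ⟨v, hvs, rfl⟩
        have hadd : PySem.Set.add seen v = seen := by
          simp [PySem.Set.add, hvs]
        have hitems : (acc.insert (g v) v).items = seen.map (fun w => (g w, w)) := by
          rw [PySem.Dict.items_insert_of_contains _ _ hc, h, List.map_map]
          apply List.map_congr_left
          intro w hw
          by_cases hgw : g w = g v
          · have : w = v := hinj w (by simp [hw]) v (by simp) hgw
            simp [Function.comp, this]
          · simp [Function.comp, hgw]
        rw [hadd]
        exact ih seen _ hitems (fun a ha b hb => hinj a (by
          rcases List.mem_append.1 ha with h1 | h1
          · exact List.mem_append.2 (Or.inl h1)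
          · exact List.mem_append.2 (Or.inr (by simp [h1]))) b (by
          rcases List.mem_append.1 hb with h1 | h1
          · exact List.mem_append.2 (Or.inl h1)
          · exact List.mem_append.2 (Or.inr (by simp [h1]))) )
      · have hc : acc.contains (g v) = false := by
          simp [PySem.Dict.contains, h]
          intro w hw hgw
          exact absurd (hinj w (by simp [hw]) v (by simp) hgw ▸ hw) (by simpa [hinj w (by simp [hw]) v (by simp) hgw] using hvs)
        have hadd : PySem.Set.add seen v = seen ++ [v] := by
          simp [PySem.Set.add, hvs]
        have hitems : (acc.insert (g v) v).items = (seen ++ [v]).map (fun w => (g w, w)) := by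
          simp [PySem.Dict.insert, hc, h]
        rw [hadd]
        exact ih (seen ++ [v]) _ hitems (fun a ha b hb => hinj a (by
          simp at ha ⊢; tauto) b (by simp at hb ⊢; tauto))

-- B's first pass: its get? is the first key with the given value
theorem firstFold_get? :
    ∀ (L : List (String × Int)) (f : PySem.Dict Int String) (v : Int),
      (L.foldl (fun f p => if f.contains p.2 then f else f.insert p.2 p.1) f).get? v
        = ((f.get? v).orElse (fun _ => (L.find? (fun p => p.2 == v)).map Prod.fst)) := by
  intro L
  induction L with
  | nil => intro f v; cases h : f.get? v <;> simp [Option.orElse, h]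
  | cons p L ih =>
      intro f v
      obtain ⟨k, w⟩ := p
      simp only [List.foldl_cons]
      by_cases hc : f.contains w = true
      · rw [if_pos hc, ih]
        by_cases hwv : w = v
        · subst hwv
          have : (f.get? w).isSome := by rw [← PySem.Dict.contains_eq_isSome_get?]; exact hc
          obtain ⟨x, hx⟩ := Option.isSome_iff_exists.1 this
          simp [hx, Option.orElse]
        · rw [List.find?_cons_of_neg (by simp [hwv])]
      · rw [if_neg hc, ih]
        have hnone : f.get? w = none := by
          cases h : f.get? w with
          | none => rfl
          | some x => exact absurd (by rw [PySem.Dict.contains_eq_isSome_get?, h]; rfl) hc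
        by_cases hwv : w = v
        · subst hwv
          rw [PySem.Dict.get?_insert]
          rw [if_pos rfl, hnone, List.find?_cons_of_pos (by simp)]
          simp [Option.orElse]
        · rw [PySem.Dict.get?_insert, if_neg (Ne.symm hwv), List.find?_cons_of_neg (by simp [hwv])]
  
-- B's first pass: its keys are the distinct values in first-occurrence order
theorem firstFold_keys :
    ∀ (L : List (String × Int)) (f : PySem.Dict Int String),
      (L.foldl (fun f p => if f.contains p.2 then f else f.insert p.2 p.1) f).keys
        = PySem.Set.update f.keys (L.map Prod.snd) := by
  intro L
  induction L with
  | nil => intro f; simp [PySem.Set.update]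
  | cons p L ih =>
      intro f
      obtain ⟨k, w⟩ := p
      simp only [List.foldl_cons, List.map_cons, PySem.Set.update, List.foldl_cons]
      by_cases hc : f.contains w = true
      · rw [if_pos hc]
        have : PySem.Set.add f.keys w = f.keys := by
          have hw : w ∈ f.keys := (PySem.Dict.contains_iff_mem_keys f w).1 hc
          simp [PySem.Set.add, hw]
        rw [ih, this]
        rfl
      · rw [if_neg hc]
        have hw : w ∉ f.keys := fun hmem => hc ((PySem.Dict.contains_iff_mem_keys f w).2 hmem)
        have : PySem.Set.add f.keys w = f.keys ++ [w] := by
          simp [PySem.Set.add, hw]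
        rw [ih, PySem.Dict.keys_insert_of_not_contains _ _ (by simpa using hc), this]
        rfl

-- Set.update splits as seen ++ (a sublist of the new elements)
theorem update_sublist :
    ∀ (l seen : List Int), ∃ t, PySem.Set.update seen l = seen ++ t ∧ t.Sublist l := by
  intro l
  induction l with
  | nil =>
      intro seen
      exact ⟨[], by rw [PySem.Set.update, List.foldl_nil, List.append_nil], List.Sublist.refl _⟩
  | cons x l ih =>
      intro seen
      simp only [PySem.Set.update, List.foldl_cons]
      by_cases hx : x ∈ seen
      · have : PySem.Set.add seen x = seen := by simp [PySem.Set.add, hx]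
        rw [this]
        obtain ⟨t, ht, hs⟩ := ih seen
        exact ⟨t, ht, hs.cons x⟩
      · have : PySem.Set.add seen x = seen ++ [x] := by simp [PySem.Set.add, hx]
        rw [this]
        obtain ⟨t, ht, hs⟩ := ih (seen ++ [x])
        exact ⟨x :: t, by show PySem.Set.update (seen ++ [x]) l = seen ++ x :: t; rw [ht]; simp, hs.cons₂ x⟩

-- nodup lists are fixed by Set.update from the left
theorem update_eq_of_nodup :
    ∀ (l seen : List Int), (seen ++ l).Nodup → PySem.Set.update seen l = seen ++ l := by
  intro l
  induction l with
  | nil => intro seen _; rw [PySem.Set.update, List.foldl_nil, List.append_nil]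
  | cons x l ih =>
      intro seen hnd
      have hx : x ∉ seen := by
        intro h
        exact (List.disjoint_of_nodup_append hnd) h (by simp)
      simp only [PySem.Set.update, List.foldl_cons]
      have : PySem.Set.add seen x = seen ++ [x] := by simp [PySem.Set.add, hx]
      rw [this]
      have : ((seen ++ [x]) ++ l).Nodup := by
        have : (seen ++ x :: l).Perm ((seen ++ [x]) ++ l) := by simp
        exact this.nodup hnd
      simpa using ih (seen ++ [x]) this

theorem sort_lines_spec : Claim_equal_sort_lines := by
  intro f_lines _
  unfold Spec_sort_lines
  show sort_lines f_lines = sort_lines_alt f_lines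
  simp only [sort_lines, sort_lines_alt]
  have hnd : (PySem.Dict.ofList f_lines).keys.Nodup := PySem.Dict.nodup_keys_ofList f_lines
  generalize hdd : PySem.Dict.ofList f_lines = d at *
  clear hdd
  -- the first key with a given value, as both sides compute it
  set g : Int → String := fkey d.items with hg
  -- find? succeeds on every value present
  have hfind : ∀ i ∈ d.values, ∃ p, d.items.find? (fun p => p.2 == i) = some p ∧ p ∈ d.items ∧ p.2 = i := by
    intro i hi
    obtain ⟨q, hq, hq2⟩ := List.mem_map.1 hi
    have : (d.items.find? (fun p => p.2 == i)).isSome := by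
      rw [List.find?_isSome]
      exact ⟨q, hq, by simp [hq2]⟩
    obtain ⟨p, hp⟩ := Option.isSome_iff_exists.1 this
    exact ⟨p, hp, List.mem_of_find?_eq_some hp, by simpa using List.find?_some hp⟩
  -- g is injective on the values present
  have ginj : ∀ v ∈ d.values, ∀ w ∈ d.values, g v = g w → v = w := by
    intro v hv w hw hgvw
    obtain ⟨p, hp, hpm, hp2⟩ := hfind v hv
    obtain ⟨q, hq, hqm, hq2⟩ := hfind w hw
    have hfst : p.1 = q.1 := by
      have : g v = p.1 := by simp [hg, fkey, hp]
      have h2 : g w = q.1 := by simp [hg, fkey, hq]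
      rw [this, h2] at hgvw; exact hgvw
    have : p = q := List.inj_on_of_nodup_map (f := Prod.fst) hnd hpm hqm hfst
    rw [← hp2, ← hq2, this]
  -- ===== A's side =====
  have hA : (PySem.List.sorted d.values (fun v => v) false).foldl
        (fun acc i => sortLinesInner d i d.keys acc) PySem.Dict.empty
      = (PySem.List.sorted d.values (fun v => v) false).foldl
        (fun acc i => acc.insert (g i) i) PySem.Dict.empty := by
    apply PySem.List.foldl_congr_mem
    intro acc i hi
    have hiv : i ∈ d.values := (PySem.List.mem_sorted d.values (fun v : Int => v) false i).1 hi
    obtain ⟨p, hp, hpm, hp2⟩ := hfind i hiv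
    have hkeys : d.keys = d.items.map Prod.fst := rfl
    rw [hkeys, inner_eq d i d.items acc (fun q hq => PySem.Dict.getD_of_mem_items d hq hnd 0), hp]
    simp [hg, fkey, hp, hp2]
  have hAitems : ((PySem.List.sorted d.values (fun v => v) false).foldl
        (fun acc i => acc.insert (g i) i) PySem.Dict.empty).items
      = (PySem.Set.ofList (PySem.List.sorted d.values (fun v => v) false)).map (fun v => (g v, v)) := by
    rw [fold_insert_items g _ [] PySem.Dict.empty rfl]
    · rfl
    · intro v hv w hw
      exact ginj v ((PySem.List.mem_sorted d.values (fun v : Int => v) false v).1 (by simpa using hv))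
                w ((PySem.List.mem_sorted d.values (fun v : Int => v) false w).1 (by simpa using hw))
  -- ===== B's side =====
  set first := d.items.foldl (fun f p => if f.contains p.2 then f else f.insert p.2 p.1)
      (PySem.Dict.empty : PySem.Dict Int String) with hfirst
  have hget : ∀ v, first.get? v = (d.items.find? (fun p => p.2 == v)).map Prod.fst := by
    intro v
    rw [hfirst, firstFold_get?]
    simp [PySem.Dict.get?_empty, Option.orElse]
  have hgetD : ∀ v, first.getD v "" = g v := by
    intro v
    rw [PySem.Dict.getD, hget v, hg, fkey]
  have hkeysB : first.keys = PySem.Set.ofList d.values := by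
    rw [hfirst, firstFold_keys]
    rfl
  have hSnodup : (PySem.List.sorted first.keys (fun v => v) false).Nodup := by
    rw [(PySem.List.sorted_perm first.keys (fun v => v) false).nodup_iff, hkeysB]
    exact PySem.Set.nodup_ofList d.values
  have hB : (PySem.List.sorted first.keys (fun v => v) false).foldl
        (fun acc v => acc.insert (first.getD v "") v) PySem.Dict.empty
      = (PySem.List.sorted first.keys (fun v => v) false).foldl
        (fun acc v => acc.insert (g v) v) PySem.Dict.empty := by
    apply PySem.List.foldl_congr_mem
    intro acc v _
    rw [hgetD v]
  have hSmem : ∀ v ∈ PySem.List.sorted first.keys (fun v => v) false, v ∈ d.values := by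
    intro v hv
    have := (PySem.List.mem_sorted first.keys (fun v : Int => v) false v).1 hv
    rw [hkeysB] at this
    exact (PySem.Set.mem_ofList _ _).1 this
  have hBitems : ((PySem.List.sorted first.keys (fun v => v) false).foldl
        (fun acc v => acc.insert (g v) v) PySem.Dict.empty).items
      = (PySem.List.sorted first.keys (fun v => v) false).map (fun v => (g v, v)) := by
    rw [fold_insert_items g _ [] PySem.Dict.empty rfl]
    · rw [show PySem.Set.update [] (PySem.List.sorted first.keys (fun v => v) false)
            = [] ++ PySem.List.sorted first.keys (fun v => v) false from
          update_eq_of_nodup _ [] (by simpa using hSnodup)]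
      simp
    · intro v hv w hw
      exact ginj v (hSmem v (by simpa using hv)) w (hSmem w (by simpa using hw))
  -- ===== bridge: dedup of the sorted values = the sorted distinct values =====
  have hbridge : PySem.List.sorted first.keys (fun v => v) false
      = PySem.Set.ofList (PySem.List.sorted d.values (fun v => v) false) := by
    rw [hkeysB]
    apply PySem.List.sorted_eq_of_perm_of_pairwise_lt
    · rw [List.perm_ext_iff_of_nodup (PySem.Set.nodup_ofList _) (PySem.Set.nodup_ofList _)]
      intro a
      rw [PySem.Set.mem_ofList, PySem.Set.mem_ofList, PySem.List.mem_sorted]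
    · obtain ⟨t, ht, hs⟩ := update_sublist (PySem.List.sorted d.values (fun v => v) false) []
      have hofl : PySem.Set.ofList (PySem.List.sorted d.values (fun v => v) false) = t := by
        rw [PySem.Set.ofList, show (PySem.Set.empty : PySem.Set Int) = [] from rfl]
        rw [show List.foldl PySem.Set.add [] (PySem.List.sorted d.values (fun v => v) false)
              = PySem.Set.update [] (PySem.List.sorted d.values (fun v => v) false) from rfl, ht]
        simp
      rw [hofl]
      have hle : t.Pairwise (fun a b : Int => a ≤ b) :=
        (PySem.List.sorted_pairwise d.values (fun v => v)).sublist hs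
      have hne : t.Nodup := by
        rw [← hofl]; exact PySem.Set.nodup_ofList _
      exact (hle.and hne).imp (fun h => lt_of_le_of_ne h.1 h.2)
  rw [hA, hAitems, hB, hBitems, hbridge]
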